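-- pv_equiv track=rewrite | github.com/CodingPenguin1/SlaterPythonGames | Warships.py | __modInput__
-- ===== SOURCE A (Python) =====
-- def __modInput__(string):
--     if len(string) > 2:
--         stringCoords = []
--         letCoordIndex, numCoordIndex = 0, 0
--         for i in range(0, len(string)):
--             if string[i].lower() in "abcdefghij":
--                 letCoordIndex = i
--                 stringCoords.append(string[i].lower())
--                 break
--         for i in range(letCoordIndex+1, len(string)):
--             if string[i] in "1234567890":
--                 numCoordIndex = i
--                 stringCoords.append(string[i])
--                 break
--         for i in range(numCoordIndex+1, len(string)):
--             if string[i].lower() in "udlr":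
--                 stringCoords.append(string[i])
--                 break
--         if len(stringCoords) == 3:
--             if stringCoords[0] in "abcdefghij" and stringCoords[1] in "1234567890" and stringCoords[2] in "udlr":
--                 newString = stringCoords[0] + stringCoords[1] + stringCoords[2]
--                 return(newString)
--         return("THISISABADSTRINGSJKLA;FDSIAF380WADSF")
--     else:
--         return("THISISABADSTRINGSJKLA;FDSIAF380WADSF")
-- ===== SOURCE B (Python) =====
-- def __modInput__(string):
--     BAD = "THISISABADSTRINGSJKLA;FDSIAF380WADSF"
--     if len(string) <= 2:
--         return BAD
--     parts = []
--     phase = 0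
--     for ch in string:
--         if phase == 0:
--             if ch.lower() in "abcdefghij":
--                 parts.append(ch.lower())
--                 phase = 1
--         elif phase == 1:
--             if ch in "1234567890":
--                 parts.append(ch)
--                 phase = 2
--         else:
--             if ch.lower() in "udlr":
--                 parts.append(ch)
--                 break
--     if len(parts) == 3 and parts[2] in "udlr":
--         return parts[0] + parts[1] + parts[2]
--     return BAD
-- ===== Notes on version B (the rewrite author's own statement) =====
-- stated objective: alternative
-- what changed: B replaces A's three sequential index-range scan loops with their index bookkeeping by a single forward pass over the characters carrying a phase variable (seek letter, then digit, then direction), followed by the same final validation.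
import Mathlib
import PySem

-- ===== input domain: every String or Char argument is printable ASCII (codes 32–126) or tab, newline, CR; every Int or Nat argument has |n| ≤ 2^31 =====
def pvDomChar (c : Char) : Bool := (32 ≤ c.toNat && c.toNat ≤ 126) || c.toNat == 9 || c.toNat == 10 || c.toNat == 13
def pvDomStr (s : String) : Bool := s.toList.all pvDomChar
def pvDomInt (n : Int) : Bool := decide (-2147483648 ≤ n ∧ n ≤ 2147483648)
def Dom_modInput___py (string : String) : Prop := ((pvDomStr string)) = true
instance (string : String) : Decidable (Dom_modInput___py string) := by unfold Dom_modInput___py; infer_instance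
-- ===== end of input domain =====

-- B is an alternative decomposition: one forward pass with a phase variable instead of A's
-- three sequential index-range scans; same return value everywhere.

-- shared constants (the string literals of the Python source)
def pvLetters : List Char := "abcdefghij".toList
def pvDigits : List Char := "1234567890".toList
def pvDirs : List Char := "udlr".toList
def pvBad : String := "THISISABADSTRINGSJKLA;FDSIAF380WADSF"

-- ===== PORT A =====
-- 'for i in range(start, len(s)): if p(s[i]): … break' — scan of the remaining chars,
-- tracking the Python index i; returns (index, char) of the first hit
def pvScanA (p : Char → Bool) : List Char → Nat → Option (Nat × Char)
  | [], _ => none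
  | c :: cs, i => if p c then some (i, c) else pvScanA p cs (i + 1)

def modInput___py (string : String) : String :=
  let s := string.toList
  if s.length > 2 then
    let r1 := pvScanA (fun c => pvLetters.contains (PySem.Chars.lowerChar c)) s 0
    let letIdx := match r1 with | some (i, _) => i | none => 0
    let coords1 : List Char := match r1 with | some (_, c) => [PySem.Chars.lowerChar c] | none => []
    let r2 := pvScanA (fun c => pvDigits.contains c) (s.drop (letIdx + 1)) (letIdx + 1)
    let numIdx := match r2 with | some (i, _) => i | none => 0
    let coords2 := match r2 with | some (_, c) => coords1 ++ [c] | none => coords1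
    let r3 := pvScanA (fun c => pvDirs.contains (PySem.Chars.lowerChar c)) (s.drop (numIdx + 1)) (numIdx + 1)
    let coords3 := match r3 with | some (_, c) => coords2 ++ [c] | none => coords2
    match coords3 with
    | [a, b, c] =>
      if pvLetters.contains a && pvDigits.contains b && pvDirs.contains c
      then String.ofList [a, b, c] else pvBad
    | _ => pvBad
  else pvBad

-- ===== PORT B =====
-- the single loop with a phase variable; 'break' = returning the accumulator
def pvPhaseLoop : List Char → Nat → List Char → List Char
  | [], _, acc => acc
  | c :: cs, phase, acc =>
    if phase = 0 then
      if pvLetters.contains (PySem.Chars.lowerChar c)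
      then pvPhaseLoop cs 1 (acc ++ [PySem.Chars.lowerChar c])
      else pvPhaseLoop cs 0 acc
    else if phase = 1 then
      if pvDigits.contains c then pvPhaseLoop cs 2 (acc ++ [c]) else pvPhaseLoop cs 1 acc
    else
      if pvDirs.contains (PySem.Chars.lowerChar c) then acc ++ [c] else pvPhaseLoop cs 2 acc

def modInput___py_alt (string : String) : String :=
  let s := string.toList
  if s.length ≤ 2 then pvBad
  else
    let parts := pvPhaseLoop s 0 []
    -- 'if len(parts) == 3 and parts[2] in "udlr": return parts[0] + parts[1] + parts[2]'
    if parts.length = 3 && pvDirs.contains (PySem.List.pyGetD parts 2 ' ')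
    then String.ofList [PySem.List.pyGetD parts 0 ' ', PySem.List.pyGetD parts 1 ' ',
                        PySem.List.pyGetD parts 2 ' ']
    else pvBad

-- ===== PRECONDITION & SPEC =====
def Spec_modInput___py (string : String) (out : String) : Prop := out = modInput___py_alt string
instance (string : String) (out : String) : Decidable (Spec_modInput___py string out) := by unfold Spec_modInput___py; infer_instance

-- ===== CLAIM (what is proved, stated in full; the proofs are below) =====
def Claim_equal_modInput___py : Prop := ∀ (string : String), Dom_modInput___py string → Spec_modInput___py string (modInput___py string)

-- ===== LEMMAS AND PROOFS =====

-- first char satisfying p together with the suffix after it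
def pvSplit (p : Char → Bool) : List Char → Option (Char × List Char)
  | [] => none
  | c :: cs => if p c then some (c, cs) else pvSplit p cs

theorem pvScanA_shape (p : Char → Bool) : ∀ (t : List Char) (i : Nat),
    (pvScanA p t i = none ∧ pvSplit p t = none) ∨
    (∃ pre c rest, pvScanA p t i = some (i + pre.length, c) ∧
      pvSplit p t = some (c, rest) ∧ t = pre ++ c :: rest ∧ p c = true) := by
  intro t
  induction t with
  | nil => intro i; left; exact ⟨rfl, rfl⟩
  | cons c cs ih =>
    intro i
    by_cases h : p c = true
    · right
      exact ⟨[], c, cs, by simp [pvScanA, h], by simp [pvSplit, h], by simp, h⟩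
    · rcases ih (i + 1) with ⟨h1, h2⟩ | ⟨pre, c', rest, h1, h2, h3, h4⟩
      · left; simp [pvScanA, pvSplit, h, h1, h2]
      · right
        refine ⟨c :: pre, c', rest, ?_, by simp [pvSplit, h, h2], by simp [h3], h4⟩
        have : pvScanA p (c :: cs) i = pvScanA p cs (i + 1) := by simp [pvScanA, h]
        rw [this, h1]
        congr 1
        · simp; omega
  
theorem pvDrop_pre : ∀ (pre : List Char) (c : Char) (rest : List Char),
    (pre ++ c :: rest).drop (pre.length + 1) = rest := by
  intro pre
  induction pre with
  | nil => simp
  | cons x xs ih => intro c rest; simpa using ih c rest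

theorem pvPhase2 (t acc : List Char) :
    pvPhaseLoop t 2 acc =
      match pvSplit (fun c => pvDirs.contains (PySem.Chars.lowerChar c)) t with
      | some (c, _) => acc ++ [c]
      | none => acc := by
  induction t generalizing acc with
  | nil => rfl
  | cons c cs ih =>
    by_cases h : PySem.Chars.lowerChar c ∈ pvDirs
    · simp [pvPhaseLoop, pvSplit, h]
    · simp [pvPhaseLoop, pvSplit, h, ih]

theorem pvPhase1 (t acc : List Char) :
    pvPhaseLoop t 1 acc =
      match pvSplit (fun c => pvDigits.contains c) t with
      | some (d, rest) => pvPhaseLoop rest 2 (acc ++ [d])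
      | none => acc := by
  induction t generalizing acc with
  | nil => rfl
  | cons c cs ih =>
    by_cases h : c ∈ pvDigits
    · simp [pvPhaseLoop, pvSplit, h]
    · simp [pvPhaseLoop, pvSplit, h, ih]

theorem pvPhase0 (t acc : List Char) :
    pvPhaseLoop t 0 acc =
      match pvSplit (fun c => pvLetters.contains (PySem.Chars.lowerChar c)) t with
      | some (c, rest) => pvPhaseLoop rest 1 (acc ++ [PySem.Chars.lowerChar c])
      | none => acc := by
  induction t generalizing acc with
  | nil => rfl
  | cons c cs ih =>
    by_cases h : PySem.Chars.lowerChar c ∈ pvLetters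
    · simp [pvPhaseLoop, pvSplit, h]
    · simp [pvPhaseLoop, pvSplit, h, ih]

-- ===== VERDICT (by name: the statement is the Claim_ definition above) =====
theorem pvDrop_pre2 (pre : List Char) (c : Char) (pre2 : List Char) (d : Char)
    (rest2 : List Char) :
    (pre ++ c :: (pre2 ++ d :: rest2)).drop (pre.length + 1 + pre2.length + 1) = rest2 := by
  have h : pre ++ c :: (pre2 ++ d :: rest2) = (pre ++ c :: pre2) ++ d :: rest2 := by simp
  have hl : pre.length + 1 + pre2.length = (pre ++ c :: pre2).length := by simp; omega
  rw [h, hl, pvDrop_pre]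

theorem modInput___py_spec : Claim_equal_modInput___py := by
  intro string _
  unfold Spec_modInput___py modInput___py modInput___py_alt
  by_cases hlen : string.toList.length > 2
  · have hlen' : ¬ string.toList.length ≤ 2 := by omega
    simp only [hlen, hlen', if_true, if_false, ite_true, ite_false]
    rcases pvScanA_shape (fun c => pvLetters.contains (PySem.Chars.lowerChar c))
        string.toList 0 with ⟨h1, h1'⟩ | ⟨pre, c0, rest, h1, h1', h3, h4⟩
    · -- no letter anywhere: both sides return pvBad
      simp only [List.contains_eq_mem] at h1'
      simp only [h1, Nat.zero_add]
      rcases hd : pvScanA (fun c => pvDigits.contains c) (string.toList.drop (0 + 1)) (0 + 1)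
        with _ | ⟨j, d⟩
      · rcases hr : pvScanA (fun c => pvDirs.contains (PySem.Chars.lowerChar c))
            (string.toList.drop (0 + 1)) (0 + 1) with _ | ⟨k, e⟩
        · simp [hd, hr, pvPhase0, h1', PySem.List.pyGetD, PySem.List.pyGet?, PySem.List.pyIdx?]
        · simp [hd, hr, pvPhase0, h1', PySem.List.pyGetD, PySem.List.pyGet?, PySem.List.pyIdx?]
      · rcases hr : pvScanA (fun c => pvDirs.contains (PySem.Chars.lowerChar c))
            (string.toList.drop (j + 1)) (j + 1) with _ | ⟨k, e⟩
        · simp [hd, hr, pvPhase0, h1', PySem.List.pyGetD, PySem.List.pyGet?, PySem.List.pyIdx?]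
        · simp [hd, hr, pvPhase0, h1', PySem.List.pyGetD, PySem.List.pyGet?, PySem.List.pyIdx?]
    · -- first letter found at index pre.length
      rw [h3] at h1 h1' ⊢
      simp only [List.contains_eq_mem] at h1'
      simp only [h1, Nat.zero_add, pvDrop_pre]
      rcases pvScanA_shape (fun c => pvDigits.contains c) rest (pre.length + 1)
        with ⟨h2, h2'⟩ | ⟨pre2, d, rest2, h2, h2', h32, h42⟩
      · -- no digit after the letter: both sides pvBad
        simp only [List.contains_eq_mem] at h2'
        simp only [h2]
        rcases hr : pvScanA (fun c => pvDirs.contains (PySem.Chars.lowerChar c))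
            ((pre ++ c0 :: rest).drop (0 + 1)) (0 + 1) with _ | ⟨k, e⟩
        · simp [hr, pvPhase0, h1', pvPhase1, h2', PySem.List.pyGetD, PySem.List.pyGet?, PySem.List.pyIdx?]
        · simp [hr, pvPhase0, h1', pvPhase1, h2', PySem.List.pyGetD, PySem.List.pyGet?, PySem.List.pyIdx?]
      · -- digit found
        rw [h32] at h2 h2' h1' ⊢
        simp only [List.contains_eq_mem] at h2'
        simp only [h2, pvDrop_pre2]
        rcases pvScanA_shape (fun c => pvDirs.contains (PySem.Chars.lowerChar c)) rest2
            (pre.length + 1 + pre2.length + 1)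
          with ⟨hr, hr'⟩ | ⟨pre3, e, rest3, hrr, hr', h33, h43⟩
        · simp only [List.contains_eq_mem] at hr' hr
          simp [hr, pvPhase0, h1', pvPhase1, h2', pvPhase2, hr', PySem.List.pyGetD, PySem.List.pyGet?, PySem.List.pyIdx?]
        · simp only [List.contains_eq_mem] at hr' hrr
          simp only [List.contains_eq_mem, decide_eq_true_eq] at h4 h42
          simp [hrr, pvPhase0, h1', pvPhase1, h2', pvPhase2, hr', h4, h42, PySem.List.pyGetD, PySem.List.pyGet?, PySem.List.pyIdx?]
  · simp only [if_neg (show ¬ string.toList.length > 2 from hlen),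
      if_pos (show string.toList.length ≤ 2 by omega)]
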